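-- pv_equiv track=rewrite | github.com/PAK-k/Project-Python | baitap.py | tongsnt
-- ===== SOURCE A (Python) =====
-- def tongsnt(n):
--     s = 0
--     while n > 0:
--         x = n % 10
--         if x == 2 or x == 3 or x == 5 or x == 7:
--             s += x
--         n //= 10
--     return s
-- ===== SOURCE B (Python) =====
-- def tongsnt(n):
--     if n <= 0:
--         return 0
--     return sum(int(d) for d in str(n) if d in '2357')
-- ===== Notes on version B (the rewrite author's own statement) =====
-- stated objective: idiomatic
-- what changed: B replaces A's least-significant-first modulo/floordiv loop with a most-significant-first scan of the decimal string representation, summing the digits that occur in '2357'.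
import Mathlib
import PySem

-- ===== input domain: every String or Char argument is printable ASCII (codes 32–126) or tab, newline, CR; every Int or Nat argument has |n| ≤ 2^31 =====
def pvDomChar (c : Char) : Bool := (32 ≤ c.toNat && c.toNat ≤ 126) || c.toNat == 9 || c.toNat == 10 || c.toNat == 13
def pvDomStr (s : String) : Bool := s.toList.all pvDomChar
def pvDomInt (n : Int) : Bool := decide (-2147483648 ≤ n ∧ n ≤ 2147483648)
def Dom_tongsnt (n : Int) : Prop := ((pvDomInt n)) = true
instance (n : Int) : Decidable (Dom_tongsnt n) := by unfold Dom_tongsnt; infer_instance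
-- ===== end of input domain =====

-- B replaces A's least-significant-first modulo loop with a most-significant-first
-- scan of the decimal string representation (idiomatic; same cost).

-- ===== PORT A =====
-- the 'while n > 0' loop of A, state (n, s)
def tongsntLoop (n s : Int) : Int :=
  if _h : n > 0 then
    let x := PySem.Int.mod n 10
    tongsntLoop (PySem.Int.floordiv n 10)
      (if x = 2 ∨ x = 3 ∨ x = 5 ∨ x = 7 then s + x else s)
  else s
termination_by n.toNat
decreasing_by
  have hd : PySem.Int.floordiv n 10 = n / 10 := by
    rw [PySem.Int.floordiv, Int.fdiv_eq_ediv, if_pos (Or.inl (by norm_num)), sub_zero]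
  rw [hd]; omega

def tongsnt (n : Int) : Int := tongsntLoop n 0

-- ===== PORT B =====
def tongsnt_alt (n : Int) : Int :=
  if n ≤ 0 then 0
  else
    (((PySem.Int.toStr n).toList.filter
        (fun c => ['2','3','5','7'].contains c)).map
      (fun c => (PySem.Int.ofChars? [c]).getD 0)).sum

-- ===== PRECONDITION & SPEC =====
def Spec_tongsnt (n : Int) (out : Int) : Prop := out = tongsnt_alt n
instance (n : Int) (out : Int) : Decidable (Spec_tongsnt n out) := by unfold Spec_tongsnt; infer_instance

-- ===== CLAIM (what is proved, stated in full; the proofs are below) =====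
def Claim_equal_tongsnt : Prop := ∀ (n : Int), Dom_tongsnt n → Spec_tongsnt n (tongsnt n)

-- ===== LEMMAS AND PROOFS =====

-- prime-digit value of a decimal digit
def pvPd (d : Nat) : Int := if d = 2 ∨ d = 3 ∨ d = 5 ∨ d = 7 then (d : Int) else 0

-- sum of the prime digits of a natural number (common mathematical characterisation)
def pvP (m : Nat) : Int :=
  if m = 0 then 0 else pvPd (m % 10) + pvP (m / 10)
termination_by m
decreasing_by exact Nat.div_lt_self (by omega) (by omega)

-- value B assigns to one character
def pvVal (c : Char) : Int :=
  if ['2','3','5','7'].contains c then (PySem.Int.ofChars? [c]).getD 0 else 0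

theorem pvVal_digitChar (d : Nat) (hd : d < 10) : pvVal (Nat.digitChar d) = pvPd d := by
  interval_cases d <;> decide

theorem filter_map_sum (cs : List Char) :
    ((cs.filter (fun c => ['2','3','5','7'].contains c)).map
      (fun c => (PySem.Int.ofChars? [c]).getD 0)).sum = (cs.map pvVal).sum := by
  induction cs with
  | nil => rfl
  | cons c cs ih =>
    rw [List.filter_cons]
    by_cases h : (['2','3','5','7'].contains c) = true
    · rw [if_pos h, List.map_cons, List.sum_cons, ih, List.map_cons, List.sum_cons,
        pvVal, if_pos h]
    · rw [if_neg h, ih, List.map_cons, List.sum_cons, pvVal, if_neg h, zero_add]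

theorem charSum_toDigitsCore (n : Nat) (fuel : Nat) (ds : List Char) (hf : n < fuel) :
    ((Nat.toDigitsCore 10 fuel n ds).map pvVal).sum = pvP n + (ds.map pvVal).sum := by
  induction n using Nat.strong_induction_on generalizing fuel ds with
  | _ n ih =>
    obtain ⟨f, rfl⟩ : ∃ f, fuel = f + 1 := ⟨fuel - 1, by omega⟩
    rw [Nat.toDigitsCore]
    by_cases h0 : n / 10 = 0
    · simp only [h0, if_pos]
      rw [pvP]
      have hn : n < 10 := by omega
      by_cases hz : n = 0
      · subst hz; simp [pvVal_digitChar 0 (by omega), pvPd]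
      · simp only [hz, if_neg, not_false_iff]
        rw [h0, pvP, if_pos rfl]
        simp [pvVal_digitChar (n % 10) (Nat.mod_lt _ (by omega))]
    · simp only [h0, if_neg, not_false_iff]
      have hn10 : 0 < n := by omega
      have hlt : n / 10 < n := Nat.div_lt_self hn10 (by omega)
      rw [ih (n / 10) hlt f (Nat.digitChar (n % 10) :: ds) (by omega)]
      conv_rhs => rw [pvP, if_neg (by omega)]
      simp [pvVal_digitChar (n % 10) (Nat.mod_lt _ (by omega))]
      ring

theorem charSum_toDigits (m : Nat) :
    ((Nat.toDigits 10 m).map pvVal).sum = pvP m := by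
  have := charSum_toDigitsCore m (m + 1) [] (by omega)
  simpa [Nat.toDigits] using this

theorem tongsntLoop_eq (n s : Int) : tongsntLoop n s = s + pvP n.toNat := by
  induction hm : n.toNat using Nat.strong_induction_on generalizing n s with
  | _ m ih =>
    subst hm
    rw [tongsntLoop]
    by_cases h : n > 0
    · simp only [h, dif_pos]
      have hn : n = ((n.toNat : Nat) : Int) := by omega
      have hmod : PySem.Int.mod n 10 = ((n.toNat % 10 : Nat) : Int) := by
        rw [PySem.Int.mod, Int.fmod_eq_emod]; omega
      have hdiv : PySem.Int.floordiv n 10 = ((n.toNat / 10 : Nat) : Int) := by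
        rw [PySem.Int.floordiv, Int.fdiv_eq_ediv, if_pos (Or.inl (by norm_num))]
        omega
      simp only [hmod, hdiv]
      rw [ih (n.toNat / 10) (Nat.div_lt_self (by omega) (by omega)) _ _ (by omega)]
      conv_rhs => rw [pvP, if_neg (by omega)]
      unfold pvPd
      have hd : n.toNat % 10 < 10 := Nat.mod_lt _ (by omega)
      split_ifs <;> push_cast at * <;> omega
    · simp only [h, dif_neg, not_false_iff]
      have : n.toNat = 0 := by omega
      rw [this, pvP]; simp

-- ===== VERDICT (by name: the statement is the Claim_ definition above) =====
theorem tongsnt_spec : Claim_equal_tongsnt := by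
  intro n _
  unfold Spec_tongsnt tongsnt tongsnt_alt
  by_cases hn : n ≤ 0
  · rw [tongsntLoop_eq]
    have h0 : n.toNat = 0 := by omega
    rw [h0, pvP]; simp [hn]
  · rw [tongsntLoop_eq, if_neg hn]
    rw [PySem.Int.toList_toStr, filter_map_sum]
    have : PySem.Int.toChars n = Nat.toDigits 10 n.toNat := by
      unfold PySem.Int.toChars
      rw [if_neg (by omega)]
    rw [this, charSum_toDigits]
    ring
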